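-- pv_equiv track=rewrite | github.com/rajeshwaranx-dev/Shortner-postbot | parser.py | already_stored
-- ===== SOURCE A (Python) =====
-- def already_stored(files: list, file_id: str, ep, quality: str, display_name: str = "") -> bool:
--     for f in files:
--         if f.get("file_id") == file_id:
--             return True
--         if ep is not None and f.get("ep") == ep and f.get("quality") == quality:
--             return True
--         if ep is None and display_name and f.get("display_name") == display_name:
--             return True
--     return False
-- ===== SOURCE B (Python) =====
-- def already_stored(files: list, file_id: str, ep, quality: str, display_name: str = "") -> bool:
--     # Project the relevant field(s) out of every record first, then answer by plain membership.
--     if file_id in [f.get("file_id") for f in files]: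
--         return True
--     if ep is not None:
--         return (ep, quality) in [(f.get("ep"), f.get("quality")) for f in files]
--     if not display_name:
--         return False
--     return display_name in [f.get("display_name") for f in files]
-- ===== Notes on version B (the rewrite author's own statement) =====
-- stated objective: alternative
-- what changed: Replaces the single loop testing three conditions per element by field projection plus membership: build the list of file_id values and test membership, then branch once on ep and test membership of the (ep, quality) pair in the projected pair list, or of display_name (after its truthiness guard) in the projected name list.
import Mathlib
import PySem

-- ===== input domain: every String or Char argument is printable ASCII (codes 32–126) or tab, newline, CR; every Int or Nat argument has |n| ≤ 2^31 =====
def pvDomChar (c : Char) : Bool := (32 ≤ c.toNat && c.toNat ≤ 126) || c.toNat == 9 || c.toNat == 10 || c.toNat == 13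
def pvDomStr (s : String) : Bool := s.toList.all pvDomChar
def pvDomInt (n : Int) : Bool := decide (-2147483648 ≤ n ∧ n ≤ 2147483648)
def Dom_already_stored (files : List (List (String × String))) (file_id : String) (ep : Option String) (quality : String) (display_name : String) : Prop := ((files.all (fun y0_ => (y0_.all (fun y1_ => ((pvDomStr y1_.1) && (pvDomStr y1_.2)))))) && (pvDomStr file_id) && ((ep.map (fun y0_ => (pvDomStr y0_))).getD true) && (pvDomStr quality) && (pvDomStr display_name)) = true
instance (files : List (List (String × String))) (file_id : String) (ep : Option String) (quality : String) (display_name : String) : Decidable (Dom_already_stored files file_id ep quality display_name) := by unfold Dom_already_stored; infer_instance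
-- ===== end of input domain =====

-- B replaces the per-element triple test by field projection plus membership tests with the ep branch decided once (objective: alternative).


-- ===== PORT A =====
def already_stored (files : List (List (String × String))) (file_id : String) (ep : Option String) (quality : String) (display_name : String) : Bool :=
  match files with
  | [] => false
  | f :: rest =>
    if (PySem.Dict.mk f).get? "file_id" == some file_id then true
    else if ep.isSome && ((PySem.Dict.mk f).get? "ep" == ep) && ((PySem.Dict.mk f).get? "quality" == some quality) then true
    else if ep.isNone && !(display_name == "") && ((PySem.Dict.mk f).get? "display_name" == some display_name) then true
    else already_stored rest file_id ep quality display_name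

-- ===== PORT B =====
def already_stored_alt (files : List (List (String × String))) (file_id : String) (ep : Option String) (quality : String) (display_name : String) : Bool :=
  if (files.map (fun f => (PySem.Dict.mk f).get? "file_id")).contains (some file_id) then true
  else
    match ep with
    | some e =>
      (files.map (fun f => ((PySem.Dict.mk f).get? "ep", (PySem.Dict.mk f).get? "quality"))).contains (some e, some quality)
    | none =>
      if display_name == "" then false
      else (files.map (fun f => (PySem.Dict.mk f).get? "display_name")).contains (some display_name)

-- ===== PRECONDITION & SPEC =====
def Spec_already_stored (files : List (List (String × String))) (file_id : String) (ep : Option String) (quality : String) (display_name : String) (out : Bool) : Prop := out = already_stored_alt files file_id ep quality display_name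
instance (files : List (List (String × String))) (file_id : String) (ep : Option String) (quality : String) (display_name : String) (out : Bool) : Decidable (Spec_already_stored files file_id ep quality display_name out) := by unfold Spec_already_stored; infer_instance

-- ===== CLAIM (what is proved, stated in full; the proofs are below) =====
def Claim_equal_already_stored : Prop := ∀ (files : List (List (String × String))) (file_id : String) (ep : Option String) (quality : String) (display_name : String), Dom_already_stored files file_id ep quality display_name → Spec_already_stored files file_id ep quality display_name (already_stored files file_id ep quality display_name)

-- ===== LEMMAS AND PROOFS =====

-- proof helper: B's membership-over-projection scans, re-expressed as direct existence scans
def altAny (files : List (List (String × String))) (file_id : String) (ep : Option String) (quality : String) (display_name : String) : Bool :=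
  if files.any (fun f => (PySem.Dict.mk f).get? "file_id" == some file_id) then true
  else
    match ep with
    | some e => files.any (fun f => ((PySem.Dict.mk f).get? "ep" == some e) && ((PySem.Dict.mk f).get? "quality" == some quality))
    | none => !(display_name == "") && files.any (fun f => (PySem.Dict.mk f).get? "display_name" == some display_name)

theorem contains_map_any {α β : Type} [BEq β] (l : List α) (g : α → β) (x : β) :
    (l.map g).contains x = l.any (fun f => x == g f) := by
  induction l with
  | nil => rfl
  | cons a t ih => simp [List.contains_cons, ih]

theorem beq_symm {β : Type} [BEq β] [LawfulBEq β] (a b : β) : (a == b) = (b == a) := by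
  apply Bool.eq_iff_iff.mpr
  simp only [beq_iff_eq]
  exact eq_comm

theorem any_beq_symm {α β : Type} [BEq β] [LawfulBEq β] (l : List α) (g : α → β) (x : β) :
    (l.any fun f => x == g f) = l.any fun f => g f == x :=
  List.any_congr rfl (fun a => beq_symm x (g a))

theorem alt_eq_altAny (files : List (List (String × String))) (file_id : String) (ep : Option String) (quality : String) (display_name : String) :
    already_stored_alt files file_id ep quality display_name = altAny files file_id ep quality display_name := by
  cases ep with
  | none =>
    simp only [already_stored_alt, altAny, contains_map_any, any_beq_symm]
    by_cases h : (display_name == "") = true <;> simp [h]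
  | some e =>
    simp only [already_stored_alt, altAny, contains_map_any, any_beq_symm]
    rfl

theorem already_stored_eq_altAny (files : List (List (String × String))) (file_id : String) (ep : Option String) (quality : String) (display_name : String) :
    already_stored files file_id ep quality display_name = altAny files file_id ep quality display_name := by
  induction files with
  | nil => cases ep <;> simp [already_stored, altAny]
  | cons f rest ih =>
    cases ep with
    | none =>
      simp only [already_stored, altAny, List.any_cons] at *
      by_cases h1 : ((PySem.Dict.mk f).get? "file_id" == some file_id) = true <;>
        by_cases h2 : (display_name == "") = true <;>
          by_cases h3 : ((PySem.Dict.mk f).get? "display_name" == some display_name) = true <;>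
            simp [h1, h2, h3] at * <;> simp [ih]
    | some e =>
      simp only [already_stored, altAny, List.any_cons] at *
      by_cases h1 : ((PySem.Dict.mk f).get? "file_id" == some file_id) = true <;>
        by_cases h2 : ((PySem.Dict.mk f).get? "ep" == some e) = true <;>
          by_cases h3 : ((PySem.Dict.mk f).get? "quality" == some quality) = true <;>
            simp [h1, h2, h3] at * <;> simp [ih]

-- ===== VERDICT (by name: the statement is the Claim_ definition above) =====
theorem already_stored_spec : Claim_equal_already_stored := by
  intro files file_id ep quality display_name _
  unfold Spec_already_stored
  rw [already_stored_eq_altAny, alt_eq_altAny]
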